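-- pv_equiv track=rewrite | github.com/oizgagin/adventofcode2024 | 17/2.py | solution
-- ===== SOURCE A (Python) =====
-- def solution(program):
--     # 2 4 - B = A & 7
--     # 1 1 - B = B ^ 1
--     # 7 5 - C = A >> B
--     # 1 5 - B = B ^ 5
--     # 4 3 - B = B ^ C
--     # 5 5 - out B
--     # 0 3 - A = A >> 3
--     # 3 0 - jnz A, 0
--
--     # while A != 0:
--     #   B = (a ^ 1) ^ 5 ^ (A >> (a ^ 1))
--     #   out B & 7
--     #   A >>= 3
--
--     AA = [0]
--     for num in program[::-1]:
--         nexts = []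
--         for a in range(0, (1 << 3)):
--             for A in AA:
--                 if ((a ^ 1) ^ 5 ^ (((A << 3) | a) >> (a ^ 1))) & 7 == num:
--                     nexts.append((A << 3) | a)
--         AA = nexts
--     return min(AA)
-- ===== SOURCE B (Python) =====
-- def solution(program):
--     # DFS from the last program digit: enumerate all reconstructible A values
--     # lazily and take the global minimum (min raises ValueError when none exist,
--     # exactly like the original).
--     def cands(rev, A):
--         # rev = program digits still to satisfy, last digit first
--         if not rev:
--             yield A
--             return
--         num = rev[0]
--         rest = rev[1:]
--         for a in range(8):
--             v = (A << 3) | a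
--             if ((a ^ 1) ^ 5 ^ (v >> (a ^ 1))) & 7 == num:
--                 yield from cands(rest, v)
--     return min(cands(program[::-1], 0))
-- ===== Notes on version B (the rewrite author's own statement) =====
-- stated objective: alternative
-- what changed: A's breadth-first search keeping a whole list of partial register values per program digit is replaced by a recursive depth-first generator over the reversed program whose leaves are fed straight to min; Pre_ excludes only the programs no register value can reproduce, where both A and B raise ValueError from min of an empty sequence.
import Mathlib
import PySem

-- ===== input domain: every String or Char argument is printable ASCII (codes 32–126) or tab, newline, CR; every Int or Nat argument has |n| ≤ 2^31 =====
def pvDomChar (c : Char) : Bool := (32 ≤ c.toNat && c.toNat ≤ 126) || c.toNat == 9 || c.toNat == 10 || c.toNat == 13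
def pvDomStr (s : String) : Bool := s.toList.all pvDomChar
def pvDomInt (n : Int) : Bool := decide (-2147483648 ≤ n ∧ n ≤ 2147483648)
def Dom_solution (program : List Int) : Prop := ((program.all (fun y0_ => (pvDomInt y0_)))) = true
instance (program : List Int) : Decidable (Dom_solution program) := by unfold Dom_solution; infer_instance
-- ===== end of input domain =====

-- B replaces A's breadth-first level-by-level candidate lists with a recursive
-- depth-first enumeration over the reversed program, taking min over its leaves
-- (objective: alternative decomposition, same exact result).

-- ===== PORT A =====
-- the shared arithmetic test '((a ^ 1) ^ 5 ^ (v >> (a ^ 1))) & 7 == num' with v = (A << 3) | a;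
-- the shift amount a ^ 1 is in 0..7 for a in range(8) / a = A & 7 with A ≥ 0, so .toNat is exact
def okDigit (a v num : Int) : Bool :=
  PySem.Int.band
    (PySem.Int.bxor (PySem.Int.bxor (PySem.Int.bxor a 1) 5)
      (v >>> (PySem.Int.bxor a 1).toNat)) 7 == num

-- one iteration of A's outer 'for num in program[::-1]' loop (the two nested inner loops)
def stepA (AA : List Int) (num : Int) : List Int :=
  (PySem.List.pyRange 0 8 1).foldl (fun nexts a =>
    AA.foldl (fun nexts (A : Int) =>
      if okDigit a (PySem.Int.bor (A <<< (3:Nat)) a) num then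
        nexts ++ [PySem.Int.bor (A <<< (3:Nat)) a]
      else nexts) nexts) []

def solution (program : List Int) : Int :=
  -- AA = the fold state; Python's min(AA) raises ValueError when AA = [] — Pre_solution excludes that, so getD 0 is unreachable
  (PySem.List.min? (((PySem.List.slice? program none none (-1)).getD []).foldl stepA [0])
    (fun x => x)).getD 0

-- ===== PORT B =====
-- B's recursive generator 'cands(rev, A)': rev = digits still to satisfy, last program digit first
def candsB : List Int → Int → List Int
  | [], A => [A]
  | num :: rest, A =>
    (PySem.List.pyRange 0 8 1).flatMap (fun a =>
      let v := PySem.Int.bor (A <<< (3:Nat)) a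
      if okDigit a v num then candsB rest v else [])

def solution_alt (program : List Int) : Int :=
  -- Python's min(...) raises ValueError when no candidate exists; Pre_solution excludes that, so getD 0 is unreachable
  (PySem.List.min? (candsB ((PySem.List.slice? program none none (-1)).getD []) 0) (fun x => x)).getD 0

-- ===== PRECONDITION & SPEC =====
-- Pre_ excludes exactly the programs that NO initial register value can reproduce: on those
-- inputs Python's min is handed an empty sequence and BOTH A and B raise ValueError, returning
-- no value.  It excludes nothing on which A returns.  validPrefixes computes, exactly and with
-- no truncation, the set of register prefixes whose emitted digits match the digits processed
-- so far (last program digit first); Pre_ says a full reconstruction exists.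
def validPrefixes (S : List Nat) (num : Int) : List Nat :=
  S.flatMap (fun (s : Nat) => (List.range 8).filterMap (fun (a : Nat) =>
    if okDigit (Int.ofNat a) (Int.ofNat ((s <<< 3) ||| a)) num then
      some ((s <<< 3) ||| a)
    else none))

def Pre_solution (program : List Int) : Prop :=
  program.reverse.foldl validPrefixes [0] ≠ []
instance (program : List Int) : Decidable (Pre_solution program) := by
  unfold Pre_solution; infer_instance

def pvWitness_solution : List Int := [4]

def Spec_solution (program : List Int) (out : Int) : Prop := out = solution_alt program
instance (program : List Int) (out : Int) : Decidable (Spec_solution program out) := by unfold Spec_solution; infer_instance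

-- ===== CLAIM (what is proved, stated in full; the proofs are below) =====
def Claim_equal_solution : Prop := ∀ (program : List Int), Dom_solution program → Pre_solution program → Spec_solution program (solution program)

-- ===== LEMMAS AND PROOFS =====

lemma filter_map_eq_flatMap {α β : Type} (p : α → Bool) (f : α → β) (l : List α) :
    (l.filter p).map f = l.flatMap (fun x => if p x then [f x] else []) := by
  induction l with
  | nil => rfl
  | cons x xs ih =>
    by_cases h : p x = true <;> simp [h, ih]

-- the two nested inner loops of A, as one flatMap expression
lemma stepA_eq_flatMap (AA : List Int) (num : Int) :
    stepA AA num =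
      (PySem.List.pyRange 0 8 1).flatMap (fun a =>
        AA.flatMap (fun (A : Int) =>
          if okDigit a (PySem.Int.bor (A <<< (3:Nat)) a) num then
            [PySem.Int.bor (A <<< (3:Nat)) a]
          else [])) := by
  unfold stepA
  have h1 : (fun (nexts : List Int) (a : Int) =>
      AA.foldl (fun nexts (A : Int) =>
        if okDigit a (PySem.Int.bor (A <<< (3:Nat)) a) num then
          nexts ++ [PySem.Int.bor (A <<< (3:Nat)) a]
        else nexts) nexts) =
      (fun (nexts : List Int) (a : Int) => nexts ++
        ((AA.filter (fun (A : Int) => okDigit a (PySem.Int.bor (A <<< (3:Nat)) a) num)).map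
          (fun (A : Int) => PySem.Int.bor (A <<< (3:Nat)) a))) := by
    funext nexts a
    exact PySem.List.foldl_append_if _ _ _ _
  rw [h1, PySem.List.foldl_append_eq_flatMap]
  simp only [List.nil_append]
  congr 1
  funext a
  exact filter_map_eq_flatMap _ _ _

-- the two flatMaps over a product commute up to permutation
lemma flatMap_flatMap_perm {α β γ : Type} (l₁ : List α) (l₂ : List β) (f : α → β → List γ) :
    (l₁.flatMap fun a => l₂.flatMap fun b => f a b).Perm
      (l₂.flatMap fun b => l₁.flatMap fun a => f a b) := by
  rw [← Multiset.coe_eq_coe]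
  simp only [← Multiset.coe_bind]
  exact Multiset.bind_bind _ _

-- BFS level lists (A) and DFS leaf lists (B) hold the same candidates, as multisets
lemma bfs_dfs_perm (ds : List Int) : ∀ (AA : List Int),
    (ds.foldl stepA AA).Perm (AA.flatMap (fun A => candsB ds A)) := by
  induction ds with
  | nil => intro AA; simp [candsB]
  | cons d ds ih =>
    intro AA
    have h1 : (List.foldl stepA AA (d :: ds)).Perm ((stepA AA d).flatMap (fun A => candsB ds A)) := by
      simpa using ih (stepA AA d)
    refine h1.trans ?_
    have h2 : (stepA AA d).flatMap (fun A => candsB ds A) =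
        (PySem.List.pyRange 0 8 1).flatMap (fun a =>
          AA.flatMap (fun (A : Int) =>
            if okDigit a (PySem.Int.bor (A <<< (3:Nat)) a) d then
              candsB ds (PySem.Int.bor (A <<< (3:Nat)) a)
            else [])) := by
      rw [stepA_eq_flatMap, List.flatMap_assoc]
      congr 1
      funext a
      rw [List.flatMap_assoc]
      congr 1
      funext A
      by_cases h : okDigit a (PySem.Int.bor (A <<< (3:Nat)) a) d = true <;> simp [h]
    rw [h2]
    refine (flatMap_flatMap_perm _ _ _).trans ?_
    have h3 : ∀ A : Int, candsB (d :: ds) A =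
        (PySem.List.pyRange 0 8 1).flatMap (fun a =>
          if okDigit a (PySem.Int.bor (A <<< (3:Nat)) a) d then
            candsB ds (PySem.Int.bor (A <<< (3:Nat)) a)
          else []) := by
      intro A; simp [candsB]
    simp only [h3]
    exact List.Perm.refl _

-- Python's min value is invariant under permutation of the list
lemma min?_perm {xs ys : List Int} (h : xs.Perm ys) :
    PySem.List.min? xs (fun x => x) = PySem.List.min? ys (fun x => x) := by
  rcases e1 : PySem.List.min? xs (fun x => x) with _ | m
  · have hx : xs = [] := (PySem.List.min?_eq_none_iff _ _).mp e1
    have hy : ys = [] := (hx ▸ h).symm.eq_nil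
    rw [hy, (PySem.List.min?_eq_none_iff _ _).mpr rfl]
  · rcases e2 : PySem.List.min? ys (fun x => x) with _ | m'
    · have hy : ys = [] := (PySem.List.min?_eq_none_iff _ _).mp e2
      have hx : xs = [] := (hy ▸ h).eq_nil
      rw [hx, (PySem.List.min?_eq_none_iff _ _).mpr rfl] at e1
      exact absurd e1 (by simp)
    · have hm : m ∈ xs := PySem.List.min?_mem e1
      have hm' : m' ∈ ys := PySem.List.min?_mem e2
      have hle : m ≤ m' := PySem.List.min?_isMin e1 m' (h.symm.subset hm')
      have hge : m' ≤ m := PySem.List.min?_isMin e2 m (h.subset hm)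
      exact congrArg some (le_antisymm hle hge)

lemma solution_eq_alt (program : List Int) : solution program = solution_alt program := by
  unfold solution solution_alt
  have h := bfs_dfs_perm ((PySem.List.slice? program none none (-1)).getD []) [0]
  simp only [List.flatMap_cons, List.flatMap_nil, List.append_nil] at h
  rw [min?_perm h]

-- ===== VERDICT (by name: the statement is the Claim_ definition above) =====
theorem solution_spec : Claim_equal_solution := by
  intro program _ _
  unfold Spec_solution
  exact solution_eq_alt program
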